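-- pv_equiv track=rewrite | github.com/yujin0706/Agent_RedTeaming | red_teaming/generate_redteam_scenarios_ver0315ver2.py | parse_expected_tools
-- ===== SOURCE A (Python) =====
-- from typing import Any, Dict, List
--
-- def parse_expected_tools(flow_text: str, known_tools: List[str]) -> List[str]:
--     if not flow_text:
--         return []
--
--     found: List[str] = []
--     for tool in known_tools:
--         if tool in flow_text and tool not in found:
--             found.append(tool)
--
--     return found
-- ===== SOURCE B (Python) =====
-- def parse_expected_tools(flow_text, known_tools):
--     if not flow_text:
--         return []
--     tool_set = set(known_tools)
--     lengths = {len(t) for t in known_tools if t}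
--     hits = set()
--     if "" in tool_set:
--         hits.add("")
--     n = len(flow_text)
--     # one pass over the text: at each position, probe the hash set with the
--     # slice of each distinct tool length
--     for i in range(n):
--         for L in lengths:
--             if i + L <= n:
--                 piece = flow_text[i:i + L]
--                 if piece in tool_set:
--                     hits.add(piece)
--     # order/dedup by known_tools (first occurrence)
--     return [t for t in dict.fromkeys(known_tools) if t in hits]
-- ===== Notes on version B (the rewrite author's own statement) =====
-- stated objective: faster
-- what changed: Instead of scanning the whole text once per tool ('tool in flow_text' for each of P tools), B makes a single pass over the text and, at each position, probes a hash set of the tools with the slice of each distinct tool length, then orders/dedups the matched set by known_tools.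
import Mathlib
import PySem

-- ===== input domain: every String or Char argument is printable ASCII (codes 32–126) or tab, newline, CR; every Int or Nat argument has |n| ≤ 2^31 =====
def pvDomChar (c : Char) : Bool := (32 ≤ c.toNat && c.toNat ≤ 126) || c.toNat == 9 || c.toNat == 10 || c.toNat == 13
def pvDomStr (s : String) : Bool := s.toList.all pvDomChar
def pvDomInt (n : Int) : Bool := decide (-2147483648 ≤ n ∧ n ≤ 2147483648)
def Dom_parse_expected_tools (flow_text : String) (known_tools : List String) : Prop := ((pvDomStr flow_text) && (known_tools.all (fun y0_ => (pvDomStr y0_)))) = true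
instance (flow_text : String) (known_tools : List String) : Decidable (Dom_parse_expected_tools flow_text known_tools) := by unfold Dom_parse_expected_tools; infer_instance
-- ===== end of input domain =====

-- B replaces A's per-tool whole-text substring scans (O(P*N)) by one pass over the text probing
-- a hash set of the tools with the slice of each distinct tool length (return values proved equal).

-- ===== PORT A =====
def parse_expected_tools (flow_text : String) (known_tools : List String) : List String :=
  if flow_text == "" then []
  else
    known_tools.foldl
      (fun found tool =>
        if PySem.Str.isIn tool flow_text && !found.contains tool then found ++ [tool]
        else found) []

-- ===== PORT B =====
-- Strings are represented by their character lists inside B's sets/slices (String.toList is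
-- injective, so set membership and slice equality are exact).
-- set(known_tools)
def pvToolSet (known_tools : List String) : PySem.Set (List Char) :=
  PySem.Set.ofList (known_tools.map String.toList)

-- {len(t) for t in known_tools if t}
def pvLengths (known_tools : List String) : PySem.Set Nat :=
  PySem.Set.ofList ((known_tools.filter (fun t => !(t == ""))).map (fun t => t.toList.length))

-- 'for i in range(n)' ported as structural recursion over the suffixes of the character list:
-- the suffix at position i IS flow_text[i:], 'i + L <= n' is 'L ≤ suffix.length', and the
-- slice flow_text[i:i+L] is 'suffix.take L' (exact: the slice is in range).
def pvScanHits (ts : PySem.Set (List Char)) (lengths : List Nat)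
    (hits : PySem.Set (List Char)) : List Char → PySem.Set (List Char)
  | [] => hits
  | c :: rest =>
      pvScanHits ts lengths
        (lengths.foldl
          (fun h L =>
            if L ≤ (c :: rest).length && PySem.Set.contains ts ((c :: rest).take L)
            then PySem.Set.add h ((c :: rest).take L) else h) hits) rest

def parse_expected_tools_alt (flow_text : String) (known_tools : List String) : List String :=
  if flow_text == "" then []
  else
    let ts := pvToolSet known_tools
    let hits0 : PySem.Set (List Char) :=
      if PySem.Set.contains ts [] then PySem.Set.add PySem.Set.empty [] else PySem.Set.empty
    let hits := pvScanHits ts (pvLengths known_tools) hits0 flow_text.toList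
    (PySem.List.dedup known_tools).filter (fun t => PySem.Set.contains hits t.toList)

-- ===== PRECONDITION & SPEC =====
def Spec_parse_expected_tools (flow_text : String) (known_tools : List String) (out : List String) : Prop := out = parse_expected_tools_alt flow_text known_tools
instance (flow_text : String) (known_tools : List String) (out : List String) : Decidable (Spec_parse_expected_tools flow_text known_tools out) := by unfold Spec_parse_expected_tools; infer_instance

-- ===== CLAIM (what is proved, stated in full; the proofs are below) =====
def Claim_equal_parse_expected_tools : Prop := ∀ (flow_text : String) (known_tools : List String), Dom_parse_expected_tools flow_text known_tools → Spec_parse_expected_tools flow_text known_tools (parse_expected_tools flow_text known_tools)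

-- ===== LEMMAS AND PROOFS =====

-- ---- A-side characterisation: A's fold = first-occurrence dedup filtered by the predicate ----

-- first-occurrence dedup, skipping elements already "seen" (proof-side helper)
def ddFrom (seen : String → Bool) : List String → List String
  | [] => []
  | t :: l => if seen t then ddFrom seen l else t :: ddFrom (fun s => seen s || s == t) l

theorem ddFrom_ext (l : List String) : ∀ (s1 s2 : String → Bool), (∀ x, s1 x = s2 x) → ddFrom s1 l = ddFrom s2 l := by
  induction l with
  | nil => intro _ _ _; rfl
  | cons t l ih =>
    intro s1 s2 h
    simp only [ddFrom, h t]
    split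
    · exact ih s1 s2 h
    · exact congrArg _ (ih _ _ (fun x => by rw [h x]))

theorem ddFrom_seen_filter (p : String → Bool) (l : List String) :
    ∀ (seen : String → Bool) (t : String), p t = false →
      (ddFrom (fun s => seen s || s == t) l).filter p = (ddFrom seen l).filter p := by
  induction l with
  | nil => intro _ _ _; rfl
  | cons s l ih =>
    intro seen t hpt
    by_cases hst : (s == t) = true
    · have hs : s = t := by simpa using hst
      subst hs
      simp only [ddFrom, hst, Bool.or_true, if_true]
      cases hseen : seen s with
      | true => simpa [hseen] using ih seen s hpt
      | false =>
        simp only [Bool.false_eq_true, if_false, List.filter_cons, hpt]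
    · have hst' : (s == t) = false := by simpa using hst
      simp only [ddFrom, hst', Bool.or_false]
      cases hseen : seen s with
      | true => simp only [if_true]; exact ih seen t hpt
      | false =>
        simp only [Bool.false_eq_true, if_false, List.filter_cons]
        have h1 : ddFrom (fun x => (seen x || x == t) || x == s) l
            = ddFrom (fun x => (seen x || x == s) || x == t) l :=
          ddFrom_ext l _ _ (fun x => by cases seen x <;> cases hx : (x == t) <;> simp)
        rw [h1, ih (fun x => seen x || x == s) t hpt]

theorem contains_append_str (acc : List String) (t x : String) :
    (acc ++ [t]).contains x = (acc.contains x || x == t) := by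
  cases hx : x == t with
  | true =>
    have hxe : x = t := by simpa using hx
    subst hxe
    simp [List.contains_eq_mem, List.mem_append]
  | false =>
    have hxe : ¬ x = t := by simpa using hx
    simp [List.contains_eq_mem, List.mem_append, hxe]

theorem foldl_found_eq (p : String → Bool) (l : List String) :
    ∀ (acc : List String),
      l.foldl (fun found tool => if p tool && !found.contains tool then found ++ [tool] else found) acc
        = acc ++ (ddFrom (fun s => acc.contains s) l).filter p := by
  induction l with
  | nil => intro acc; simp [ddFrom]
  | cons t l ih =>
    intro acc
    simp only [List.foldl_cons, ddFrom]
    cases hc : acc.contains t with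
    | true =>
      simp only [Bool.not_true, Bool.and_false, Bool.false_eq_true, if_false, if_true]
      exact ih acc
    | false =>
      simp only [Bool.not_false, Bool.and_true, Bool.false_eq_true, if_false]
      cases hp : p t with
      | true =>
        simp only [if_true]
        rw [ih (acc ++ [t])]
        rw [ddFrom_ext l _ _ (fun x => contains_append_str acc t x)]
        simp [hp]
      | false =>
        simp only [hp, Bool.false_eq_true, if_false, List.filter_cons]
        rw [ih acc, ddFrom_seen_filter p l _ t hp]

theorem setAdd_foldl_eq (l : List String) :
    ∀ (s : List String), l.foldl PySem.Set.add s = s ++ ddFrom (fun x => s.contains x) l := by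
  induction l with
  | nil => intro s; simp [ddFrom]
  | cons t l ih =>
    intro s
    simp only [List.foldl_cons, ddFrom, PySem.Set.add]
    cases hc : PySem.Set.contains s t with
    | true =>
      have hc' : s.contains t = true := by simpa [PySem.Set.contains_eq_listContains] using hc
      simp only [hc', if_true]
      exact ih s
    | false =>
      have hc' : s.contains t = false := by simpa [PySem.Set.contains_eq_listContains] using hc
      simp only [hc', Bool.false_eq_true, if_false]
      rw [ih (s ++ [t]), ddFrom_ext l _ _ (fun x => contains_append_str s t x)]
      simp

theorem dedup_eq_ddFrom (l : List String) : PySem.List.dedup l = ddFrom (fun _ => false) l := by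
  have h := setAdd_foldl_eq l []
  simp only [List.nil_append] at h
  rw [PySem.List.dedup_eq_ofList, PySem.Set.ofList_eq_foldl, h]
  exact ddFrom_ext l _ _ (fun x => by simp)

-- ---- B-side characterisation ----

-- the inner length fold: x is in the result iff it was, or x is a tool-set slice at this suffix
theorem addPiece_contains (ts : PySem.Set (List Char)) (s : List Char) (lengths : List Nat) :
    ∀ (h : PySem.Set (List Char)) (x : List Char),
      PySem.Set.contains
          (lengths.foldl
            (fun h L =>
              if L ≤ s.length && PySem.Set.contains ts (s.take L)
              then PySem.Set.add h (s.take L) else h) h) x = true ↔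
        PySem.Set.contains h x = true ∨
          ∃ L ∈ lengths, L ≤ s.length ∧ s.take L = x ∧ PySem.Set.contains ts x = true := by
  induction lengths with
  | nil => intro h x; simp
  | cons L ls ih =>
    intro h x
    simp only [List.foldl_cons]
    by_cases hcond : (decide (L ≤ s.length) && PySem.Set.contains ts (s.take L)) = true
    · rw [if_pos hcond, ih]
      obtain ⟨hle, hts⟩ := Bool.and_eq_true_iff.mp hcond
      have hle' : L ≤ s.length := of_decide_eq_true hle
      constructor
      · rintro (hd | ⟨L', hL', hrest⟩)
        · rcases (PySem.Set.mem_add _ _ _).mp ((PySem.Set.contains_iff _ _).mp hd) with hm | he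
          · exact Or.inl ((PySem.Set.contains_iff _ _).mpr hm)
          · subst he
            exact Or.inr ⟨L, List.mem_cons_self .., hle', rfl, hts⟩
        · exact Or.inr ⟨L', List.mem_cons_of_mem _ hL', hrest⟩
      · rintro (hd | ⟨L', hL', hle2, htake, hts2⟩)
        · refine Or.inl ((PySem.Set.contains_iff _ _).mpr ((PySem.Set.mem_add _ _ _).mpr ?_))
          exact Or.inl ((PySem.Set.contains_iff _ _).mp hd)
        · rcases List.mem_cons.mp hL' with hLe | hmem
          · subst hLe
            refine Or.inl ((PySem.Set.contains_iff _ _).mpr ((PySem.Set.mem_add _ _ _).mpr ?_))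
            exact Or.inr htake.symm
          · exact Or.inr ⟨L', hmem, hle2, htake, hts2⟩
    · rw [if_neg hcond, ih]
      constructor
      · rintro (hd | ⟨L', hL', hrest⟩)
        · exact Or.inl hd
        · exact Or.inr ⟨L', List.mem_cons_of_mem _ hL', hrest⟩
      · rintro (hd | ⟨L', hL', hle2, htake, hts2⟩)
        · exact Or.inl hd
        · rcases List.mem_cons.mp hL' with hLe | hmem
          · subst hLe
            rw [← htake] at hts2
            exact absurd (Bool.and_eq_true_iff.mpr ⟨decide_eq_true hle2, hts2⟩) hcond
          · exact Or.inr ⟨L', hmem, hle2, htake, hts2⟩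

-- the text pass: x is in the result iff it already was, or x is a tool-set slice at some position
theorem scanHits_contains (ts : PySem.Set (List Char)) (lengths : List Nat) (cs : List Char) :
    ∀ (h : PySem.Set (List Char)) (x : List Char),
      PySem.Set.contains (pvScanHits ts lengths h cs) x = true ↔
        PySem.Set.contains h x = true ∨
          ∃ j < cs.length, ∃ L ∈ lengths,
            L ≤ (cs.drop j).length ∧ (cs.drop j).take L = x ∧ PySem.Set.contains ts x = true := by
  induction cs with
  | nil =>
    intro h x
    simp [pvScanHits]
  | cons c rest ih =>
    intro h x
    simp only [pvScanHits]
    rw [ih, addPiece_contains]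
    constructor
    · rintro (hd | ⟨j, hj, hrest⟩)
      · rcases hd with hd | ⟨L, hL, hle, htake, hts⟩
        · exact Or.inl hd
        · exact Or.inr ⟨0, by simp, L, hL, by simpa using hle, by simpa using htake, hts⟩
      · exact Or.inr ⟨j + 1, by simpa using hj, by simpa using hrest⟩
    · rintro (hd | ⟨j, hj, hrest⟩)
      · exact Or.inl (Or.inl hd)
      · cases j with
        | zero =>
          obtain ⟨L, hL, hle, htake, hts⟩ := hrest
          exact Or.inl (Or.inr ⟨L, hL, by simpa using hle, by simpa using htake, hts⟩)
        | succ k =>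
          exact Or.inr ⟨k, by simpa using hj, by simpa using hrest⟩

theorem mem_dedup_iff (l : List String) (t : String) : t ∈ PySem.List.dedup l ↔ t ∈ l := by
  rw [PySem.List.dedup_eq_ofList]
  exact PySem.Set.mem_ofList _ _

-- the heart: after the scan, 'contains hits t' is exactly 'tool occurs in the text', for a known tool
theorem hits_iff (flow_text : String) (known_tools : List String) (t : String)
    (hmem : t ∈ known_tools) :
    PySem.Set.contains
        (pvScanHits (pvToolSet known_tools) (pvLengths known_tools)
          (if PySem.Set.contains (pvToolSet known_tools) [] then
            PySem.Set.add PySem.Set.empty [] else PySem.Set.empty)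
          flow_text.toList) t.toList = true
      ↔ PySem.Str.isIn t flow_text = true := by
  rw [PySem.Str.isIn_iff_infix, scanHits_contains]
  constructor
  · rintro (h0 | ⟨j, hj, L, hL, hle, htake, hts⟩)
    · have hnil : t.toList = [] := by
        by_cases hc : PySem.Set.contains (pvToolSet known_tools) [] = true
        · rw [if_pos hc] at h0
          rcases (PySem.Set.mem_add _ _ _).mp ((PySem.Set.contains_iff _ _).mp h0) with hm | he
          · exact absurd hm (by simp [PySem.Set.empty])
          · exact he
        · rw [if_neg hc] at h0
          exact absurd ((PySem.Set.contains_iff _ _).mp h0) (by simp [PySem.Set.empty])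
      rw [hnil]
      exact List.nil_infix
    · rw [← htake]
      exact ((List.take_prefix _ _).isInfix).trans (List.drop_suffix j flow_text.toList).isInfix
  · intro hinf
    by_cases ht : t = ""
    · subst ht
      have hc : PySem.Set.contains (pvToolSet known_tools) [] = true := by
        refine (PySem.Set.contains_iff _ _).mpr ((PySem.Set.mem_ofList _ _).mpr ?_)
        exact List.mem_map.mpr ⟨"", hmem, rfl⟩
      rw [if_pos hc]
      refine Or.inl ((PySem.Set.contains_iff _ _).mpr ((PySem.Set.mem_add _ _ _).mpr (Or.inr ?_)))
      rfl
    · obtain ⟨j, hp⟩ := (PySem.Chars.exists_prefix_drop_iff_isIn t.toList flow_text.toList).mpr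
        ((PySem.Chars.isIn_iff_infix _ _).mpr hinf)
      have htl : t.toList ≠ [] := fun h => ht (String.toList_eq_nil_iff.mp h)
      have hj : j < flow_text.toList.length := by
        by_contra hge
        have hnil : flow_text.toList.drop j = [] := List.drop_eq_nil_of_le (by omega)
        rw [hnil] at hp
        exact htl (List.prefix_nil.mp hp)
      refine Or.inr ⟨j, hj, t.toList.length, ?_, hp.length_le, ?_, ?_⟩
      · refine (PySem.Set.mem_ofList _ _).mpr ?_
        exact List.mem_map.mpr ⟨t, List.mem_filter.mpr ⟨hmem, by simp [ht]⟩, rfl⟩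
      · exact (List.prefix_iff_eq_take.mp hp).symm
      · exact (PySem.Set.contains_iff _ _).mpr ((PySem.Set.mem_ofList _ _).mpr
          (List.mem_map.mpr ⟨t, hmem, rfl⟩))

-- ===== VERDICT (by name: the statement is the Claim_ definition above) =====
theorem parse_expected_tools_spec : Claim_equal_parse_expected_tools := by
  intro flow_text known_tools _
  unfold Spec_parse_expected_tools parse_expected_tools parse_expected_tools_alt
  by_cases h : flow_text == ""
  · simp [h]
  · simp only [h, Bool.false_eq_true, if_false]
    rw [foldl_found_eq (fun t => PySem.Str.isIn t flow_text) known_tools []]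
    simp only [List.nil_append]
    rw [ddFrom_ext known_tools _ (fun _ => false) (fun x => by simp), ← dedup_eq_ddFrom]
    apply List.filter_congr
    intro t hmem
    exact Bool.coe_iff_coe.mp
      ((hits_iff flow_text known_tools t ((mem_dedup_iff known_tools t).mp hmem)).symm)
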